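-- pv_equiv track=rewrite | github.com/AtmaHou/MetaDialog | scripts/other_tool/meta_dataset_generator/raw_data_loader.py | merge_data_part
-- ===== SOURCE A (Python) =====
-- def merge_data_part(splited_data_lst):
--     merged_data = {}
--     for data_part in splited_data_lst:
--         for intent_name in data_part:
--             if intent_name in merged_data:
--                 merged_data[intent_name]['seq_ins'].extend(data_part[intent_name]['seq_ins'])
--                 merged_data[intent_name]['seq_outs'].extend(data_part[intent_name]['seq_outs'])
--                 merged_data[intent_name]['labels'].extend(data_part[intent_name]['labels'])
--             else:
--                 merged_data[intent_name] = data_part[intent_name]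
--     return merged_data
-- ===== SOURCE B (Python) =====
-- def merge_data_part(splited_data_lst):
--     # Pass 1: group, per intent name in first-encounter order, all part values.
--     groups = {}
--     for data_part in splited_data_lst:
--         for intent_name, value in data_part.items():
--             groups[intent_name] = groups.get(intent_name, []) + [value]
--     # Pass 2: merge each group by extending the first value (kept by reference) in place.
--     merged_data = {}
--     for intent_name, vals in groups.items():
--         first = vals[0]
--         for other in vals[1:]:
--             first['seq_ins'].extend(other['seq_ins'])
--             first['seq_outs'].extend(other['seq_outs'])
--             first['labels'].extend(other['labels'])
--         merged_data[intent_name] = first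
--     return merged_data
-- ===== Notes on version B (the rewrite author's own statement) =====
-- stated objective: alternative
-- what changed: A merges as it goes in one interleaved loop (lookup-and-extend per entry); B first groups all inner dicts per intent name in first-encounter order, then merges each group by folding the later dicts onto the first one.
import Mathlib
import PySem

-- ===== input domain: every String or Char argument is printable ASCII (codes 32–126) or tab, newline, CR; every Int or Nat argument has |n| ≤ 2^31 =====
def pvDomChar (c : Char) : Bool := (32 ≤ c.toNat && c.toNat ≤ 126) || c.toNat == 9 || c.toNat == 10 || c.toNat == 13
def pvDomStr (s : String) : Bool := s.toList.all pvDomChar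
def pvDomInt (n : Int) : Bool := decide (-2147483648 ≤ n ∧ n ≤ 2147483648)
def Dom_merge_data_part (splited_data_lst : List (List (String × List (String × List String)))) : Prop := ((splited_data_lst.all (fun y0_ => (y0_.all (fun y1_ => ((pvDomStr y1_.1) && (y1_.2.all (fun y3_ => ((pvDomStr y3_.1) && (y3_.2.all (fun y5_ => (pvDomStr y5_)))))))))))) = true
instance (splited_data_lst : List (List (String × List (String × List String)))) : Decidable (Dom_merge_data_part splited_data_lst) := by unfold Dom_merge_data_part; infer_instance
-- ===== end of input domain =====

-- B replaces A's single merge-as-you-go loop by two passes (group values per intent, then fold each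
-- group onto its first value); objective: alternative decomposition, same cost. Both Pythons extend
-- the first-seen inner dict's lists in place (the same input mutation); equivalence here is about the
-- return value.

-- ===== PORT A =====
-- d[f].extend(xs) for the three fields f, reading src[f] (value semantics; overwrite keeps position)
def pvExtend3 (d : PySem.Dict String (List String)) (src : PySem.Dict String (List String)) :
    PySem.Dict String (List String) :=
  let d := d.insert "seq_ins" (d.getD "seq_ins" [] ++ src.getD "seq_ins" [])
  let d := d.insert "seq_outs" (d.getD "seq_outs" [] ++ src.getD "seq_outs" [])
  d.insert "labels" (d.getD "labels" [] ++ src.getD "labels" [])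

def merge_data_part (splited_data_lst : List (List (String × List (String × List String)))) :
    List (String × List (String × List String)) :=
  (splited_data_lst.foldl
    (fun (merged_data : PySem.Dict String (PySem.Dict String (List String))) data_part =>
      data_part.foldl
        (fun merged_data kv =>
          if merged_data.contains kv.1 then
            merged_data.insert kv.1
              (pvExtend3 (merged_data.getD kv.1 PySem.Dict.empty)
                (PySem.Dict.mk ((PySem.Dict.mk data_part).getD kv.1 [])))
          else
            merged_data.insert kv.1 (PySem.Dict.mk ((PySem.Dict.mk data_part).getD kv.1 [])))
        merged_data)
    PySem.Dict.empty).items.map (fun p => (p.1, p.2.items))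

-- ===== PORT B =====
-- vals[0] extended by each of vals[1:]
def pvMergeVals (vals : List (List (String × List String))) : List (String × List String) :=
  match vals with
  | [] => []
  | first :: rest =>
    (rest.foldl (fun acc other => pvExtend3 acc (PySem.Dict.mk other)) (PySem.Dict.mk first)).items

def merge_data_part_alt (splited_data_lst : List (List (String × List (String × List String)))) :
    List (String × List (String × List String)) :=
  let groups : PySem.Dict String (List (List (String × List String))) :=
    splited_data_lst.foldl
      (fun groups data_part =>
        data_part.foldl (fun groups kv => groups.insert kv.1 (groups.getD kv.1 [] ++ [kv.2])) groups)
      PySem.Dict.empty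
  groups.items.map (fun p => (p.1, pvMergeVals p.2))

-- ===== PRECONDITION & SPEC =====
-- Pre_ excludes (a) association lists with a duplicate key inside one dict, which no Python dict can
-- represent (A, given the corresponding collapsed dict, still returns), and (b) inputs where an intent
-- name occurring in several parts maps somewhere to an inner dict missing one of the keys 'seq_ins',
-- 'seq_outs', 'labels': there Python A raises KeyError (and B raises too).
def Pre_merge_data_part (splited_data_lst : List (List (String × List (String × List String)))) : Prop :=
  (∀ part ∈ splited_data_lst, (part.map Prod.fst).Nodup ∧
      ∀ kv ∈ part, (kv.2.map Prod.fst).Nodup) ∧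
  (∀ part ∈ splited_data_lst, ∀ kv ∈ part,
      2 ≤ splited_data_lst.countP (fun p => decide (kv.1 ∈ p.map Prod.fst)) →
      "seq_ins" ∈ kv.2.map Prod.fst ∧ "seq_outs" ∈ kv.2.map Prod.fst ∧
        "labels" ∈ kv.2.map Prod.fst)
instance (splited_data_lst : List (List (String × List (String × List String)))) : Decidable (Pre_merge_data_part splited_data_lst) := by unfold Pre_merge_data_part; infer_instance

def pvWitness_merge_data_part : (List (List (String × List (String × List String)))) :=
  [[("greet", [("seq_ins", ["hi"]), ("seq_outs", ["O"]), ("labels", ["greet"])])],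
   [("greet", [("seq_ins", ["yo"]), ("seq_outs", ["O"]), ("labels", ["greet"])]),
    ("bye", [("seq_ins", ["bye"]), ("seq_outs", ["O"]), ("labels", ["bye"])])]]

def Spec_merge_data_part (splited_data_lst : List (List (String × List (String × List String)))) (out : List (String × List (String × List String))) : Prop := out = merge_data_part_alt splited_data_lst
instance (splited_data_lst : List (List (String × List (String × List String)))) (out : List (String × List (String × List String))) : Decidable (Spec_merge_data_part splited_data_lst out) := by unfold Spec_merge_data_part; infer_instance

-- ===== CLAIM (what is proved, stated in full; the proofs are below) =====
def Claim_equal_merge_data_part : Prop := ∀ (splited_data_lst : List (List (String × List (String × List String)))), Dom_merge_data_part splited_data_lst → Pre_merge_data_part splited_data_lst → Spec_merge_data_part splited_data_lst (merge_data_part splited_data_lst)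

-- ===== LEMMAS AND PROOFS =====

def pvMergeNE (vals : List (List (String × List String))) : PySem.Dict String (List String) :=
  match vals with
  | [] => PySem.Dict.empty
  | v :: r => r.foldl (fun acc w => pvExtend3 acc (PySem.Dict.mk w)) (PySem.Dict.mk v)

def pvStepA (m : PySem.Dict String (PySem.Dict String (List String)))
    (kv : String × List (String × List String)) : PySem.Dict String (PySem.Dict String (List String)) :=
  if m.contains kv.1 then
    m.insert kv.1 (pvExtend3 (m.getD kv.1 PySem.Dict.empty) (PySem.Dict.mk kv.2))
  else m.insert kv.1 (PySem.Dict.mk kv.2)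

def pvStepB (g : PySem.Dict String (List (List (String × List String))))
    (kv : String × List (String × List String)) : PySem.Dict String (List (List (String × List String))) :=
  g.insert kv.1 (g.getD kv.1 [] ++ [kv.2])

def pvInv (m : PySem.Dict String (PySem.Dict String (List String)))
    (g : PySem.Dict String (List (List (String × List String)))) : Prop :=
  g.keys.Nodup ∧ (∀ p ∈ g.items, p.2 ≠ []) ∧
    m.items = g.items.map (fun p => (p.1, pvMergeNE p.2))

theorem pvMergeNE_append (vs : List (List (String × List String))) (v : List (String × List String))
    (h : vs ≠ []) : pvMergeNE (vs ++ [v]) = pvExtend3 (pvMergeNE vs) (PySem.Dict.mk v) := by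
  cases vs with
  | nil => simp at h
  | cons w r => simp [pvMergeNE, List.foldl_append]

theorem pvLookup (part : List (String × List (String × List String)))
    (hnd : (part.map Prod.fst).Nodup) (kv : String × List (String × List String)) (hmem : kv ∈ part) :
    (PySem.Dict.mk part).getD kv.1 [] = kv.2 := by
  apply PySem.Dict.getD_of_mem_items
  · exact hmem
  · simpa [PySem.Dict.keys_mk] using hnd

theorem pvKeysEq (m : PySem.Dict String (PySem.Dict String (List String)))
    (g : PySem.Dict String (List (List (String × List String))))
    (h : m.items = g.items.map (fun p => (p.1, pvMergeNE p.2))) : m.keys = g.keys := by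
  simp only [PySem.Dict.keys, h, List.map_map]
  rfl

theorem pvStep (m : PySem.Dict String (PySem.Dict String (List String)))
    (g : PySem.Dict String (List (List (String × List String))))
    (kv : String × List (String × List String)) (h : pvInv m g) :
    pvInv (pvStepA m kv) (pvStepB g kv) := by
  obtain ⟨hnd, hne, hitems⟩ := h
  have hkeys := pvKeysEq m g hitems
  have hcont : m.contains kv.1 = g.contains kv.1 := by
    simp [PySem.Dict.contains_eq_decide_mem_keys, hkeys]
  by_cases hc : g.contains kv.1 = true
  · -- existing key
    obtain ⟨vs, hvs⟩ : ∃ vs, g.get? kv.1 = some vs := by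
      have := PySem.Dict.contains_eq_isSome_get? (d := g) (k := kv.1)
      rw [hc] at this
      exact Option.isSome_iff_exists.mp this.symm
    have hvmem : (kv.1, vs) ∈ g.items := PySem.Dict.mem_items_of_get?_eq_some g hvs
    have hvne : vs ≠ [] := hne _ hvmem
    have hgetg : g.getD kv.1 [] = vs := PySem.Dict.getD_of_get?_eq_some g [] hvs
    have hmnd : m.keys.Nodup := by rw [hkeys]; exact hnd
    have hmmem : (kv.1, pvMergeNE vs) ∈ m.items := by
      rw [hitems]
      exact List.mem_map.mpr ⟨(kv.1, vs), hvmem, rfl⟩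
    have hgetm : m.getD kv.1 PySem.Dict.empty = pvMergeNE vs :=
      PySem.Dict.getD_of_mem_items m hmmem hmnd PySem.Dict.empty
    refine ⟨?_, ?_, ?_⟩
    · rw [pvStepB, PySem.Dict.keys_insert_of_contains _ _ hc]; exact hnd
    · intro p hp
      rw [pvStepB] at hp
      rcases (PySem.Dict.mem_items_insert _ _ _ _).mp hp with h1 | h2
      · subst h1; simp
      · exact hne _ h2.1
    · rw [pvStepA, if_pos (hcont.trans hc), pvStepB,
        PySem.Dict.items_insert_of_contains _ _ (hcont.trans hc),
        PySem.Dict.items_insert_of_contains _ _ hc, hitems, List.map_map, List.map_map]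
      apply List.map_congr_left
      intro p hp
      by_cases hpk : p.1 == kv.1
      · simp only [Function.comp_def, hpk, if_pos, hgetm, hgetg]
        simp only [beq_iff_eq] at hpk
        simp [pvMergeNE_append vs kv.2 hvne]
      · have hpk' : ¬ p.1 = kv.1 := by simpa using hpk
        simp [hpk']
  · -- new key
    have hc' : g.contains kv.1 = false := by simpa using hc
    have hcm : m.contains kv.1 = false := by rw [hcont]; exact hc'
    have hknotin : kv.1 ∉ g.keys := by
      have := PySem.Dict.contains_eq_decide_mem_keys (d := g) (k := kv.1)
      rw [hc'] at this; exact of_decide_eq_false this.symm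
    have hgetg : g.getD kv.1 [] = [] := PySem.Dict.getD_of_not_contains _ _ hc'
    refine ⟨?_, ?_, ?_⟩
    · rw [pvStepB, hgetg, PySem.Dict.keys_insert_of_not_contains _ _ hc']
      simp only [List.nodup_append, hnd, List.nodup_singleton, true_and]
      intro a ha b hb
      rw [List.mem_singleton] at hb
      subst hb
      intro hab
      subst hab
      exact hknotin ha
    · intro p hp
      rw [pvStepB] at hp
      rcases (PySem.Dict.mem_items_insert _ _ _ _).mp hp with h1 | h2
      · subst h1; simp
      · exact hne _ h2.1
    · rw [pvStepA, if_neg (by simp [hcm]), pvStepB, hgetg,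
        PySem.Dict.items_insert_of_not_contains _ _ hcm,
        PySem.Dict.items_insert_of_not_contains _ _ hc', hitems]
      simp [pvMergeNE]
theorem pvFold (l : List (String × List (String × List String)))
    (m : PySem.Dict String (PySem.Dict String (List String)))
    (g : PySem.Dict String (List (List (String × List String)))) (h : pvInv m g) :
    pvInv (l.foldl pvStepA m) (l.foldl pvStepB g) := by
  induction l generalizing m g with
  | nil => exact h
  | cons kv rest ih => exact ih _ _ (pvStep m g kv h)

theorem pvInnerA (part : List (String × List (String × List String)))
    (hnd : (part.map Prod.fst).Nodup)
    (m : PySem.Dict String (PySem.Dict String (List String))) :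
    part.foldl
      (fun merged_data kv =>
        if merged_data.contains kv.1 then
          merged_data.insert kv.1
            (pvExtend3 (merged_data.getD kv.1 PySem.Dict.empty)
              (PySem.Dict.mk ((PySem.Dict.mk part).getD kv.1 [])))
        else
          merged_data.insert kv.1 (PySem.Dict.mk ((PySem.Dict.mk part).getD kv.1 []))) m
      = part.foldl pvStepA m := by
  apply PySem.List.foldl_congr_mem
  intro b a ha
  rw [pvLookup part hnd a ha, pvStepA]
theorem pvOuter (lst : List (List (String × List (String × List String))))
    (hpre : ∀ part ∈ lst, (part.map Prod.fst).Nodup)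
    (m : PySem.Dict String (PySem.Dict String (List String)))
    (g : PySem.Dict String (List (List (String × List String)))) (h : pvInv m g) :
    pvInv
      (lst.foldl
        (fun merged_data data_part =>
          data_part.foldl
            (fun merged_data kv =>
              if merged_data.contains kv.1 then
                merged_data.insert kv.1
                  (pvExtend3 (merged_data.getD kv.1 PySem.Dict.empty)
                    (PySem.Dict.mk ((PySem.Dict.mk data_part).getD kv.1 [])))
              else
                merged_data.insert kv.1 (PySem.Dict.mk ((PySem.Dict.mk data_part).getD kv.1 [])))
            merged_data) m)
      (lst.foldl (fun groups data_part => data_part.foldl pvStepB groups) g) := by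
  induction lst generalizing m g with
  | nil => exact h
  | cons part rest ih =>
    simp only [List.foldl_cons]
    rw [pvInnerA part (hpre part (List.mem_cons_self)) m]
    exact ih (fun p hp => hpre p (List.mem_cons_of_mem _ hp)) _ _ (pvFold part m g h)


theorem pvMergeVals_items (vals : List (List (String × List String))) :
    pvMergeVals vals = (pvMergeNE vals).items := by
  cases vals <;> rfl

theorem pvMainEq (lst : List (List (String × List (String × List String))))
    (hpre : ∀ part ∈ lst, (part.map Prod.fst).Nodup) :
    merge_data_part lst = merge_data_part_alt lst := by
  obtain ⟨-, -, hitems⟩ :=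
    pvOuter lst hpre PySem.Dict.empty PySem.Dict.empty
      (by refine ⟨by decide, ?_, rfl⟩; intro p hp; cases hp)
  simp only [merge_data_part, merge_data_part_alt]
  show ((lst.foldl (fun merged_data data_part =>
      data_part.foldl
        (fun merged_data kv =>
          if merged_data.contains kv.1 then
            merged_data.insert kv.1
              (pvExtend3 (merged_data.getD kv.1 PySem.Dict.empty)
                (PySem.Dict.mk ((PySem.Dict.mk data_part).getD kv.1 [])))
          else
            merged_data.insert kv.1 (PySem.Dict.mk ((PySem.Dict.mk data_part).getD kv.1 [])))
        merged_data) (PySem.Dict.empty : PySem.Dict String (PySem.Dict String (List String)))).items.map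
      (fun p => (p.1, p.2.items))) =
    ((lst.foldl (fun groups data_part => data_part.foldl pvStepB groups)
        (PySem.Dict.empty : PySem.Dict String (List (List (String × List String))))).items.map
      (fun p => (p.1, pvMergeVals p.2)))
  rw [hitems, List.map_map]
  apply List.map_congr_left
  intro p hp
  simp [pvMergeVals_items]

-- ===== VERDICT (by name: the statement is the Claim_ definition above) =====
theorem merge_data_part_spec : Claim_equal_merge_data_part := by
  intro lst _hdom hpre
  unfold Spec_merge_data_part
  exact pvMainEq lst (fun part hp => (hpre.1 part hp).1)
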